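-- pv_equiv track=rewrite | github.com/fatihbiyiklio/Geneys-Cloud-Reporting-API | src/app/utils/conversation_helpers.py | _format_ivr_display
-- ===== SOURCE A (Python) =====
-- def _format_ivr_display(ivr_attrs):
--     """Format IVR attributes for display in UI."""
--     if not ivr_attrs:
--         return None
--
--     # Priority order for display - include more patterns
--     priority_keys = ["workgroup", "dtmf", "menu", "selection", "departman", "secim", "choice", "option", "priority", "note", "callback"]
--
--     # Find the most relevant value to display
--     for pkey in priority_keys:
--         for key, val in ivr_attrs.items():
--             if pkey in key.lower() and val:
--                 # Format nicely: "ivr.Priority: 50" -> "Priority: 50"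
--                 display_key = key.split(".")[-1] if "." in key else key
--                 return f"{display_key}: {val}"
--
--     # If no priority match, return first non-empty value
--     for key, val in ivr_attrs.items():
--         if val:
--             display_key = key.split(".")[-1] if "." in key else key
--             return f"{display_key}: {val}"
--
--     return None
-- ===== SOURCE B (Python) =====
-- def _format_ivr_display(ivr_attrs):
--     """Format IVR attributes for display in UI (single-pass min-rank version)."""
--     if not ivr_attrs:
--         return None
--
--     priority_keys = ["workgroup", "dtmf", "menu", "selection", "departman", "secim", "choice", "option", "priority", "note", "callback"]
--     sentinel = len(priority_keys)
--
--     best = None       # (key, val) of the best candidate so far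
--     best_rank = None  # its rank: index of the first matching priority key, or sentinel
--     for key, val in ivr_attrs.items():
--         if not val:
--             continue
--         kl = key.lower()
--         rank = next((i for i, pk in enumerate(priority_keys) if pk in kl), sentinel)
--         if best is None or rank < best_rank:
--             best = (key, val)
--             best_rank = rank
--
--     if best is None:
--         return None
--     key, val = best
--     display_key = key.split(".")[-1] if "." in key else key
--     return f"{display_key}: {val}"
-- ===== Notes on version B (the rewrite author's own statement) =====
-- stated objective: alternative
-- what changed: Replaces the priority-outer/items-inner nested scan (plus a separate fallback pass) by a single pass over the items that computes each non-empty entry's priority rank (index of the first matching priority key, sentinel len(priority_keys) if none) and keeps the earliest entry of strictly minimal rank.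
import Mathlib
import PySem

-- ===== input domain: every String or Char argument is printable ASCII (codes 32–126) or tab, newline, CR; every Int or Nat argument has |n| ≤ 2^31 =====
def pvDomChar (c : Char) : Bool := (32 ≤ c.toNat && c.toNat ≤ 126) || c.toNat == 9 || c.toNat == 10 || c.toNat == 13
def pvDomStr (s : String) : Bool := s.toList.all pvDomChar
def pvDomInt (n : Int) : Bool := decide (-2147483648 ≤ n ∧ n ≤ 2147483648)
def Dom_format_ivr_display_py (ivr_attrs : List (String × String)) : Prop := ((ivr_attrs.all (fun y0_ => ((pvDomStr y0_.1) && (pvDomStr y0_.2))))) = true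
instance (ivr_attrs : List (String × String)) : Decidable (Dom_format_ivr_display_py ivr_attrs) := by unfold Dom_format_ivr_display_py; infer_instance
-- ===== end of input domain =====

-- B replaces A's priority-outer/dict-inner nested scan by a single pass over the items that tracks the
-- candidate of minimal priority rank (objective: alternative decomposition; one scan of the dict instead of up to twelve).


-- the fixed priority list of both Pythons
def pvPriorityKeys : List String :=
  ["workgroup", "dtmf", "menu", "selection", "departman", "secim", "choice", "option", "priority", "note", "callback"]

-- `f"{display_key}: {val}"` with `display_key = key.split(".")[-1] if "." in key else key`
-- (identical line in both Pythons; the two `k` fallback branches are unreachable: the separator "." is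
-- non-empty so split? returns some, and split never returns an empty list, so parts[-1] exists)
def pvFmt (k v : String) : String :=
  let dk := if PySem.Str.isIn "." k then
              match PySem.Str.split? k "." with
              | some parts =>
                match PySem.List.pyGet? parts (-1) with
                | some d => d
                | none => k
              | none => k
            else k
  dk ++ ": " ++ v

-- ===== PORT A =====
-- the outer `for pkey in priority_keys` loop; the inner `for key, val in ivr_attrs.items()` loop is find?
def pvLoopA : List String → List (String × String) → Option (String × String)
  | [], _ => none
  | p :: ps, l =>
    match l.find? (fun kv => PySem.Str.isIn p (PySem.Str.lower kv.1) && kv.2 != "") with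
    | some kv => some kv
    | none => pvLoopA ps l

def format_ivr_display_py (ivr_attrs : List (String × String)) : Option String :=
  if ivr_attrs = [] then none
  else
    match pvLoopA pvPriorityKeys ivr_attrs with
    | some (k, v) => some (pvFmt k v)
    | none =>
      -- fallback: first non-empty value
      match ivr_attrs.find? (fun kv => kv.2 != "") with
      | some (k, v) => some (pvFmt k v)
      | none => none

-- ===== PORT B =====
-- rank = index of the first priority key that is a substring of the lowered key, or the sentinel len(priority_keys)
def pvRank : List String → String → Nat
  | [], _ => 0
  | p :: ps, kl => if PySem.Str.isIn p kl then 0 else pvRank ps kl + 1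

-- the single pass; accumulator best = (best_rank, (key, val)), updated only on strict '<'
def pvGo : Option (Nat × (String × String)) → List (String × String) → Option (Nat × (String × String))
  | best, [] => best
  | best, (k, v) :: rest =>
    if v == "" then pvGo best rest
    else
      let r := pvRank pvPriorityKeys (PySem.Str.lower k)
      match best with
      | none => pvGo (some (r, (k, v))) rest
      | some (br, b) => if r < br then pvGo (some (r, (k, v))) rest else pvGo (some (br, b)) rest

def format_ivr_display_py_alt (ivr_attrs : List (String × String)) : Option String :=
  if ivr_attrs = [] then none
  else
    match pvGo none ivr_attrs with
    | none => none
    | some (_, (k, v)) => some (pvFmt k v)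

-- ===== PRECONDITION & SPEC =====
def Spec_format_ivr_display_py (ivr_attrs : List (String × String)) (out : Option String) : Prop := out = format_ivr_display_py_alt ivr_attrs
instance (ivr_attrs : List (String × String)) (out : Option String) : Decidable (Spec_format_ivr_display_py ivr_attrs out) := by unfold Spec_format_ivr_display_py; infer_instance

-- ===== CLAIM (what is proved, stated in full; the proofs are below) =====
def Claim_equal_format_ivr_display_py : Prop := ∀ (ivr_attrs : List (String × String)), Dom_format_ivr_display_py ivr_attrs → Spec_format_ivr_display_py ivr_attrs (format_ivr_display_py ivr_attrs)

-- ===== LEMMAS AND PROOFS =====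

-- abbreviations for the proofs
def pvP (kv : String × String) : Bool := kv.2 != ""
def pvM (p : String) (kv : String × String) : Bool := PySem.Str.isIn p (PySem.Str.lower kv.1)
def pvRk (ps : List String) (kv : String × String) : Nat := pvRank ps (PySem.Str.lower kv.1)

-- reference selector: the earliest element of minimal rank (ties kept by '≤' towards the front)
def pvPick (ps : List String) : List (String × String) → Option (Nat × (String × String))
  | [] => none
  | kv :: t =>
    match pvPick ps t with
    | none => some (pvRk ps kv, kv)
    | some (br, e) => if pvRk ps kv ≤ br then some (pvRk ps kv, kv) else some (br, e)

def pvMerge (best o : Option (Nat × (String × String))) : Option (Nat × (String × String)) :=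
  match best with
  | none => o
  | some (br, b) =>
    match o with
    | none => some (br, b)
    | some (r, e) => if r < br then some (r, e) else some (br, b)

lemma pvRk_cons_pos (p : String) (ps : List String) (kv : String × String)
    (h : pvM p kv = true) : pvRk (p :: ps) kv = 0 := by
  simp only [pvM] at h
  simp only [pvRk, pvRank]
  rw [if_pos h]

lemma pvRk_cons_neg (p : String) (ps : List String) (kv : String × String)
    (h : pvM p kv = false) : pvRk (p :: ps) kv = pvRk ps kv + 1 := by
  simp only [pvM] at h
  simp only [pvRk, pvRank]
  rw [if_neg (by intro hc; rw [hc] at h; exact Bool.noConfusion h)]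

lemma pvRank_le (ps : List String) (kl : String) : pvRank ps kl ≤ ps.length := by
  induction ps with
  | nil => simp [pvRank]
  | cons p ps ih => simp only [pvRank, List.length_cons]; split <;> omega

-- B's pass computes the earliest-minimal candidate among the non-empty-value items
lemma pvGo_eq_merge (l : List (String × String)) :
    ∀ best, pvGo best l = pvMerge best (pvPick pvPriorityKeys (l.filter pvP)) := by
  induction l with
  | nil => intro best; cases best <;> simp [pvGo, pvMerge, pvPick]
  | cons kv rest ih =>
    intro best
    obtain ⟨k, v⟩ := kv
    by_cases hv : v = ""
    · have hPf : pvP (k, v) = false := by simp [pvP, hv]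
      subst hv
      simp only [pvGo, BEq.rfl, if_true, List.filter_cons, hPf, Bool.false_eq_true, if_false]
      exact ih best
    · have hP : pvP (k, v) = true := by simp [pvP, hv]
      have hvb : (v == "") = false := by simp [hv]
      cases hp : pvPick pvPriorityKeys (rest.filter pvP) with
      | none =>
        have hpick : pvPick pvPriorityKeys (((k, v) :: rest).filter pvP) =
            some (pvRank pvPriorityKeys (PySem.Str.lower k), (k, v)) := by
          simp [hP, pvPick, pvRk, hp]
        rw [hpick]
        cases best with
        | none =>
          simp only [pvGo, hvb, Bool.false_eq_true, if_false]
          rw [ih, hp]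
          simp [pvMerge]
        | some b =>
          obtain ⟨bbr, bkv⟩ := b
          simp only [pvGo, hvb, Bool.false_eq_true, if_false]
          by_cases hlt : pvRank pvPriorityKeys (PySem.Str.lower k) < bbr
          · rw [if_pos hlt, ih, hp]
            simp only [pvMerge]
            rw [if_pos hlt]
          · rw [if_neg hlt, ih, hp]
            simp only [pvMerge]
            rw [if_neg hlt]
      | some o =>
        obtain ⟨br, e⟩ := o
        by_cases hle : pvRank pvPriorityKeys (PySem.Str.lower k) ≤ br
        · have hpick : pvPick pvPriorityKeys (((k, v) :: rest).filter pvP) =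
              some (pvRank pvPriorityKeys (PySem.Str.lower k), (k, v)) := by
            simp [hP, pvPick, pvRk, hp, hle]
          rw [hpick]
          cases best with
          | none =>
            simp only [pvGo, hvb, Bool.false_eq_true, if_false]
            rw [ih, hp]
            simp only [pvMerge]
            rw [if_neg (by omega)]
          | some b =>
            obtain ⟨bbr, bkv⟩ := b
            simp only [pvGo, hvb, Bool.false_eq_true, if_false]
            by_cases hlt : pvRank pvPriorityKeys (PySem.Str.lower k) < bbr
            · rw [if_pos hlt, ih, hp]
              simp only [pvMerge]
              rw [if_neg (by omega), if_pos hlt]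
            · rw [if_neg hlt, ih, hp]
              simp only [pvMerge]
              rw [if_neg (by omega), if_neg hlt]
        · have hpick : pvPick pvPriorityKeys (((k, v) :: rest).filter pvP) = some (br, e) := by
            simp [hP, pvPick, pvRk, hp, hle]
          rw [hpick]
          cases best with
          | none =>
            simp only [pvGo, hvb, Bool.false_eq_true, if_false]
            rw [ih, hp]
            simp only [pvMerge]
            rw [if_pos (by omega)]
          | some b =>
            obtain ⟨bbr, bkv⟩ := b
            simp only [pvGo, hvb, Bool.false_eq_true, if_false]
            by_cases hlt : pvRank pvPriorityKeys (PySem.Str.lower k) < bbr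
            · rw [if_pos hlt, ih, hp]
              simp only [pvMerge]
              rw [if_pos (by omega), if_pos (by omega)]
            · rw [if_neg hlt, ih, hp]

-- A's inner find over the raw items = find over the non-empty-value candidates
lemma find?_and_filter (p : String) (l : List (String × String)) :
    l.find? (fun kv => pvM p kv && pvP kv) = (l.filter pvP).find? (pvM p) := by
  induction l with
  | nil => simp
  | cons kv t ih =>
    by_cases hP : pvP kv = true
    · by_cases hM : pvM p kv = true
      · simp [hP, hM]
      · simp only [Bool.not_eq_true] at hM
        simp [hP, hM, ih]
    · simp only [Bool.not_eq_true] at hP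
      simp [hP, ih]

-- if some candidate matches p, pick over (p :: ps) returns the first matching one with rank 0
lemma pvPick_zero (p : String) (ps : List String) (c : List (String × String)) (e : String × String)
    (h : c.find? (pvM p) = some e) : pvPick (p :: ps) c = some (0, e) := by
  induction c with
  | nil => simp at h
  | cons kv t ih =>
    by_cases hM : pvM p kv = true
    · rw [List.find?_cons_of_pos hM] at h
      injection h with h
      subst h
      have h0 := pvRk_cons_pos p ps kv hM
      simp only [pvPick, h0]
      cases pvPick (p :: ps) t with
      | none => simp
      | some o => obtain ⟨br, e'⟩ := o; simp
    · simp only [Bool.not_eq_true] at hM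
      rw [List.find?_cons_of_neg (by simp [hM])] at h
      have h1 := pvRk_cons_neg p ps kv hM
      simp only [pvPick, ih h, h1]
      simp

-- if no candidate matches p, pick over (p :: ps) is pick over ps with every rank shifted by one
lemma pvPick_shift (p : String) (ps : List String) (c : List (String × String))
    (h : ∀ kv ∈ c, pvM p kv = false) :
    pvPick (p :: ps) c = (pvPick ps c).map (fun o => (o.1 + 1, o.2)) := by
  induction c with
  | nil => simp [pvPick]
  | cons kv t ih =>
    have h1 := pvRk_cons_neg p ps kv (h kv (by simp))
    have iht := ih (fun x hx => h x (by simp [hx]))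
    simp only [pvPick, iht, h1]
    cases pvPick ps t with
    | none => simp
    | some o =>
      obtain ⟨br, e⟩ := o
      simp only [Option.map_some]
      by_cases hle : pvRk ps kv ≤ br
      · rw [if_pos hle, if_pos (by omega)]
        simp
      · rw [if_neg hle, if_neg (by omega)]
        simp

-- A's priority loop over the candidates = pick, restricted to ranks below the sentinel
lemma pvLoopA_eq_pick (ps : List String) (l : List (String × String)) :
    pvLoopA ps l =
      match pvPick ps (l.filter pvP) with
      | none => none
      | some (r, e) => if r < ps.length then some e else none := by
  induction ps with
  | nil =>
    cases h : pvPick ([] : List String) (l.filter pvP) with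
    | none => simp [pvLoopA]
    | some o => obtain ⟨r, e⟩ := o; simp [pvLoopA]
  | cons p ps ih =>
    have hfa : (fun kv : String × String => PySem.Str.isIn p (PySem.Str.lower kv.1) && kv.2 != "")
        = fun kv => pvM p kv && pvP kv := rfl
    simp only [pvLoopA, hfa, find?_and_filter]
    cases hf : (l.filter pvP).find? (pvM p) with
    | some e =>
      rw [pvPick_zero p ps _ e hf]
      simp
    | none =>
      have hnone : ∀ kv ∈ l.filter pvP, pvM p kv = false := by
        intro kv hkv
        have := List.find?_eq_none.mp hf kv hkv
        simpa using this
      rw [pvPick_shift p ps _ hnone, ih]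
      cases hp : pvPick ps (l.filter pvP) with
      | none => simp
      | some o =>
        obtain ⟨r, e⟩ := o
        simp only [Option.map_some, List.length_cons]
        by_cases hlt : r < ps.length
        · rw [if_pos hlt, if_pos (by omega)]
        · rw [if_neg hlt, if_neg (by omega)]

-- pick never returns none on a nonempty candidate list
lemma pvPick_ne_none (ps : List String) (kv : String × String) (t : List (String × String)) :
    pvPick ps (kv :: t) ≠ none := by
  simp only [pvPick]
  intro hcontra
  cases hp : pvPick ps t with
  | none => rw [hp] at hcontra; simp at hcontra
  | some o =>
    obtain ⟨br, e⟩ := o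
    rw [hp] at hcontra
    dsimp only at hcontra
    split at hcontra <;> simp at hcontra

-- every rank pick returns is at most the sentinel
lemma pvPick_rank_le (ps : List String) (c : List (String × String)) (r : Nat) (e : String × String)
    (h : pvPick ps c = some (r, e)) : r ≤ ps.length := by
  induction c generalizing r e with
  | nil => simp [pvPick] at h
  | cons kv t ih =>
    simp only [pvPick] at h
    cases hp : pvPick ps t with
    | none =>
      rw [hp] at h
      dsimp only at h
      injection h with h
      simp only [Prod.mk.injEq] at h
      rw [← h.1]
      exact pvRank_le ps _
    | some o =>
      obtain ⟨br, e'⟩ := o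
      rw [hp] at h
      dsimp only at h
      by_cases hle : pvRk ps kv ≤ br
      · rw [if_pos hle] at h
        injection h with h
        simp only [Prod.mk.injEq] at h
        rw [← h.1]
        exact pvRank_le ps _
      · rw [if_neg hle] at h
        injection h with h
        simp only [Prod.mk.injEq] at h
        rw [← h.1]
        exact ih br e' hp
  -- (the injected pair equalities give the rank as a component)

-- if the minimal rank is the sentinel, the picked element is the first candidate
lemma pvPick_sentinel (ps : List String) (c : List (String × String)) (e : String × String)
    (h : pvPick ps c = some (ps.length, e)) : c.head? = some e := by
  cases c with
  | nil => simp [pvPick] at h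
  | cons kv t =>
    simp only [pvPick] at h
    cases hp : pvPick ps t with
    | none =>
      rw [hp] at h
      dsimp only at h
      injection h with h
      simp only [Prod.mk.injEq] at h
      simp [h.2]
    | some o =>
      obtain ⟨br, e'⟩ := o
      have hbr := pvPick_rank_le ps t br e' hp
      have hkv := pvRank_le ps (PySem.Str.lower kv.1)
      rw [hp] at h
      dsimp only at h
      by_cases hle : pvRk ps kv ≤ br
      · rw [if_pos hle] at h
        injection h with h
        simp only [Prod.mk.injEq] at h
        simp [h.2]
      · -- tail won with rank ps.length, but then pvRk kv ≤ ps.length = br would have kept kv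
        rw [if_neg hle] at h
        injection h with h
        simp only [Prod.mk.injEq] at h
        simp only [pvRk] at hle
        omega

-- ===== VERDICT (by name: the statement is the Claim_ definition above) =====
theorem format_ivr_display_py_spec : Claim_equal_format_ivr_display_py := by
  unfold Claim_equal_format_ivr_display_py
  intro l _
  unfold Spec_format_ivr_display_py format_ivr_display_py format_ivr_display_py_alt
  by_cases hnil : l = []
  · simp [hnil]
  · simp only [hnil, if_false]
    rw [pvGo_eq_merge l none, pvLoopA_eq_pick]
    have hfb : l.find? (fun kv => kv.2 != "") = (l.filter pvP).head? := by
      have hpp : (fun kv : String × String => kv.2 != "") = pvP := rfl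
      rw [hpp]
      exact (List.head?_filter).symm
    cases hp : pvPick pvPriorityKeys (l.filter pvP) with
    | none =>
      cases hc : l.filter pvP with
      | nil => simp [pvMerge, hfb, hc]
      | cons kv t => exact absurd (hc ▸ hp) (pvPick_ne_none _ kv t)
    | some o =>
      obtain ⟨r, e⟩ := o
      by_cases hlt : r < pvPriorityKeys.length
      · simp [pvMerge, hlt]
      · have hle := pvPick_rank_le _ _ _ _ hp
        have hr : r = pvPriorityKeys.length := by omega
        subst hr
        have hhead := pvPick_sentinel _ _ _ hp
        simp only [pvMerge, hlt, if_false, hfb, hhead]
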